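-- pv_equiv track=rewrite | github.com/MrBrantCode/unitest_baseline | mut_generate/mist_train_taco/taco_475/solution.py | minimum_flips_to_white
-- ===== SOURCE A (Python) =====
-- def minimum_flips_to_white(m, n, grid):
--     y_cnt = [0] * m
--     x_cnt = [0] * n
--     black = set()
--
--     for y in range(m):
--         for x in range(n):
--             if grid[y][x] == "B":
--                 x_cnt[x] += 1
--                 y_cnt[y] += 1
--                 black.add((x, y))
--
--     ans = 0
--     for y in range(m):
--         for x in range(n):
--             ans += (x_cnt[x] + y_cnt[y] + ((x, y) in black)) & 1
--
--     return ans
-- ===== SOURCE B (Python) =====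
-- def minimum_flips_to_white(m, n, grid):
--     # One scan collects the black cells; everything else is aggregate counting.
--     blacks = [(x, y) for y in range(m) for x in range(n) if grid[y][x] == "B"]
--     x_par = {}
--     y_par = {}
--     for x, y in blacks:
--         x_par[x] = x_par.get(x, 0) ^ 1
--         y_par[y] = y_par.get(y, 0) ^ 1
--     c1 = sum(x_par.values())
--     r1 = sum(y_par.values())
--     return (n - c1) * r1 + c1 * (m - r1) + sum(
--         1 - 2 * ((x_par[x] + y_par[y]) & 1) for x, y in blacks)
-- ===== Notes on version B (the rewrite author's own statement) =====
-- stated objective: alternative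
-- what changed: A's second full m*n scan that re-evaluates each cell's parity is replaced by aggregate counting: one comprehension collects the black cells, per-column/per-row parity dicts are built from that list alone, the all-white answer (n-c1)*r1+c1*(m-r1) comes from the parity-class counts in closed form, and only the black cells are revisited to flip their contribution.
import Mathlib
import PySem

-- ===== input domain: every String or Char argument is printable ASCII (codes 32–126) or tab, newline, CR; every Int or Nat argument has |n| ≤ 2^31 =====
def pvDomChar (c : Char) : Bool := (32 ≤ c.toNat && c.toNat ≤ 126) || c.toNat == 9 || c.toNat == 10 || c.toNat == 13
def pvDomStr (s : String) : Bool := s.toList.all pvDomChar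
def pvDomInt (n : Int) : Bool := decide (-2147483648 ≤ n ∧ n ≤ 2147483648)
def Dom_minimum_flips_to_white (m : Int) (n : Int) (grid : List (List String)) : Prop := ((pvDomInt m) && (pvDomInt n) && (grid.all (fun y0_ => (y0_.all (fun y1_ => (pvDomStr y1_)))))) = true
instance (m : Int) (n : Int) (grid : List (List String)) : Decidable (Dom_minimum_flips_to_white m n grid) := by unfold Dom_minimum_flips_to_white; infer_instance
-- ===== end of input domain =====

-- B replaces A's second full m×n parity scan by aggregate counting: parity class counts of
-- rows/columns give the all-white answer in closed form, and only the black cells are revisited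
-- to flip their contribution (objective: alternative/faster second phase, same exact value).

-- grid[y][x] (both Pythons read cells with this one expression; exact under Pre_, which
-- guarantees every accessed index is in range)
def pvCell (grid : List (List String)) (y x : Int) : String :=
  PySem.List.pyGetD (PySem.List.pyGetD grid y []) x ""

-- ===== PORT A =====
def minimum_flips_to_white (m : Int) (n : Int) (grid : List (List String)) : Int :=
  let y_cnt : List Int := PySem.List.pyRepeat [0] m
  let x_cnt : List Int := PySem.List.pyRepeat [0] n
  let s :=
    (PySem.List.pyRange 0 m).foldl (fun s y =>
      (PySem.List.pyRange 0 n).foldl (fun s x =>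
        if pvCell grid y x == "B" then
          (s.1.modify x.toNat (· + 1),
           (s.2.1.modify y.toNat (· + 1), PySem.Set.add s.2.2 (x, y)))
        else s) s)
      (x_cnt, (y_cnt, (PySem.Set.empty : PySem.Set (Int × Int))))
  (PySem.List.pyRange 0 m).foldl (fun ans y =>
    (PySem.List.pyRange 0 n).foldl (fun ans x =>
      ans + PySem.Int.band
        (s.1.getD x.toNat 0 + s.2.1.getD y.toNat 0 +
          (if (x, y) ∈ s.2.2 then 1 else 0)) 1) ans) 0

-- ===== PORT B =====
def minimum_flips_to_white_alt (m : Int) (n : Int) (grid : List (List String)) : Int :=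
  let blacks : List (Int × Int) :=
    (PySem.List.pyRange 0 m).flatMap (fun y =>
      ((PySem.List.pyRange 0 n).filter (fun x => pvCell grid y x == "B")).map (fun x => (x, y)))
  let s :=
    blacks.foldl (fun s p =>
      (s.1.modify p.1 0 (fun v => PySem.Int.bxor v 1),
       s.2.modify p.2 0 (fun v => PySem.Int.bxor v 1)))
      ((PySem.Dict.empty : PySem.Dict Int Int), (PySem.Dict.empty : PySem.Dict Int Int))
  let c1 := s.1.values.sum
  let r1 := s.2.values.sum
  (n - c1) * r1 + c1 * (m - r1) +
    (blacks.map (fun p =>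
      1 - 2 * PySem.Int.band (s.1.getD p.1 0 + s.2.getD p.2 0) 1)).sum

-- ===== PRECONDITION & SPEC =====
-- Pre_ excludes exactly the inputs where A raises IndexError: when both loop ranges are
-- nonempty (m > 0 and n > 0), the grid must have at least m rows and each scanned row at
-- least n cells (with m ≤ 0 or n ≤ 0 the grid is never indexed and A returns).
def Pre_minimum_flips_to_white (m : Int) (n : Int) (grid : List (List String)) : Prop :=
  0 < m → 0 < n → (m.toNat ≤ grid.length ∧ ∀ row ∈ grid.take m.toNat, n.toNat ≤ row.length)
instance (m : Int) (n : Int) (grid : List (List String)) : Decidable (Pre_minimum_flips_to_white m n grid) := by unfold Pre_minimum_flips_to_white; infer_instance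

def pvWitness_minimum_flips_to_white : Int × Int × List (List String) :=
  (2, 2, [["B", "W"], ["W", "B"]])

def Spec_minimum_flips_to_white (m : Int) (n : Int) (grid : List (List String)) (out : Int) : Prop := out = minimum_flips_to_white_alt m n grid
instance (m : Int) (n : Int) (grid : List (List String)) (out : Int) : Decidable (Spec_minimum_flips_to_white m n grid out) := by unfold Spec_minimum_flips_to_white; infer_instance

-- ===== CLAIM (what is proved, stated in full; the proofs are below) =====
def Claim_equal_minimum_flips_to_white : Prop := ∀ (m : Int) (n : Int) (grid : List (List String)), Dom_minimum_flips_to_white m n grid → Pre_minimum_flips_to_white m n grid → Spec_minimum_flips_to_white m n grid (minimum_flips_to_white m n grid)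

-- ===== LEMMAS AND PROOFS =====

-- the cell list scanned by both programs (as produced by the ports' ranges), and the black cells
def pvCells (m n : Int) : List (Int × Int) :=
  (PySem.List.pyRange 0 m).flatMap (fun y => (PySem.List.pyRange 0 n).map (fun x => (x, y)))
def pvBlacks (m n : Int) (grid : List (List String)) : List (Int × Int) :=
  (pvCells m n).filter (fun p => pvCell grid p.2 p.1 == "B")

-- column / row black counts read off the black-cell list
def pvCCk (L : List (Int × Int)) (j : Nat) : Int := (L.countP (fun p => p.1.toNat = j) : Int)
def pvRCk (L : List (Int × Int)) (j : Nat) : Int := (L.countP (fun p => p.2.toNat = j) : Int)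

-- pyRange 0 k as a map over List.range (also for negative k, where both are empty)
lemma pv_pyRange0 (k : Int) :
    PySem.List.pyRange 0 k = (List.range k.toNat).map (fun (i : Nat) => (i : Int)) := by
  by_cases h : 0 ≤ k
  · have hk : k = (k.toNat : Int) := (Int.toNat_of_nonneg h).symm
    conv_lhs => rw [hk, PySem.List.pyRange_zero_natCast]
  · have h0 : k.toNat = 0 := Int.toNat_of_nonpos (by omega)
    have : PySem.List.pyRange 0 k = [] := by
      refine List.eq_nil_iff_forall_not_mem.mpr (fun x hx => ?_)
      have := PySem.List.mem_pyRange_one.mp hx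
      omega
    simp [this, h0]

-- a fold of List.modify updates, read back entrywise
lemma pv_foldl_modify_getElem? {β : Type} (idx : β → Nat) (f : Int → Int)
    (l : List β) (a0 : List Int) (j : Nat) :
    (l.foldl (fun a p => a.modify (idx p) f) a0)[j]? =
      (f^[l.countP (fun p => idx p = j)]) <$> a0[j]? := by
  induction l generalizing a0 with
  | nil => simp
  | cons h t ih =>
    simp only [List.foldl_cons, ih, List.countP_cons, List.getElem?_modify]
    by_cases hj : idx h = j
    · cases a0[j]? with
      | none => simp
      | some v => simp [hj]
    · cases a0[j]? with
      | none => simp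
      | some v => simp [hj]

lemma pv_iter_add (k : Nat) : (fun v : Int => v + 1)^[k] 0 = (k : Int) := by
  induction k with
  | zero => simp
  | succ k ih => rw [Function.iterate_succ_apply', ih]; push_cast; ring

lemma pv_iter_bxor (k : Nat) : (fun v : Int => PySem.Int.bxor v 1)^[k] 0 = (k : Int) % 2 := by
  induction k with
  | zero => simp
  | succ k ih =>
    rw [Function.iterate_succ_apply', ih]
    have hc : ((k + 1 : Nat) : Int) = (k : Int) + 1 := by push_cast; ring
    rcases Int.emod_two_eq (k : Int) with h | h <;>
      rw [h] <;>
      simp only [show PySem.Int.bxor 0 1 = 1 from by decide,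
        show PySem.Int.bxor 1 1 = 0 from by decide, hc] <;> omega

-- a modify-fold starting from replicate IS the table of its per-index values
lemma pv_modify_fold_eq_map {β : Type} (idx : β → Nat) (f : Int → Int) (l : List β) (N : Nat) :
    (l.foldl (fun a p => a.modify (idx p) f) (List.replicate N (0 : Int))) =
      (List.range N).map (fun j => f^[l.countP (fun p => idx p = j)] 0) := by
  apply List.ext_getElem?
  intro j
  rw [pv_foldl_modify_getElem?, List.getElem?_map, List.getElem?_replicate]
  by_cases hj : j < N
  · rw [List.getElem?_range hj]; simp [hj]
  · rw [List.getElem?_eq_none (by simp; omega)]; simp [hj]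

-- B's black-cell comprehension is the filtered cell list
lemma pv_blacks_eq (m n : Int) (grid : List (List String)) :
    ((PySem.List.pyRange 0 m).flatMap (fun y =>
      ((PySem.List.pyRange 0 n).filter (fun x => pvCell grid y x == "B")).map
        (fun x => (x, y)))) = pvBlacks m n grid := by
  rw [pvBlacks, pvCells, List.filter_flatMap]
  congr 1
  funext y
  rw [List.filter_map]
  rfl

-- every black cell has coordinates inside the scanned rectangle
lemma pv_blacks_mem (m n : Int) (grid : List (List String)) :
    ∀ p ∈ pvBlacks m n grid,
      p.1.toNat < n.toNat ∧ p.2.toNat < m.toNat ∧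
        p = ((p.1.toNat : Int), (p.2.toNat : Int)) := by
  intro p hp
  have hc : p ∈ pvCells m n := List.mem_of_mem_filter hp
  rw [pvCells, List.mem_flatMap] at hc
  obtain ⟨y, hy, hmem⟩ := hc
  rw [List.mem_map] at hmem
  obtain ⟨x, hx, rfl⟩ := hmem
  have hyb := PySem.List.mem_pyRange_one.mp hy
  have hxb := PySem.List.mem_pyRange_one.mp hx
  refine ⟨by omega, by omega, ?_⟩
  simp only
  rw [Int.toNat_of_nonneg hxb.1, Int.toNat_of_nonneg hyb.1]

def pvCellsN (M N : Nat) : List (Nat × Nat) :=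
  (List.range M).flatMap (fun y => (List.range N).map (fun x => (x, y)))

lemma pv_cells_eq (m n : Int) :
    pvCells m n = (pvCellsN m.toNat n.toNat).map (fun q => ((q.1 : Int), (q.2 : Int))) := by
  rw [pvCells, pvCellsN, pv_pyRange0 m, pv_pyRange0 n, List.flatMap_map, List.map_flatMap]
  congr 1
  funext y
  rw [List.map_map, List.map_map]
  rfl

lemma pv_double_sum (M N : Nat) (F : Nat → Nat → Int) :
    ((List.range M).map (fun y => ((List.range N).map (fun x => F x y)).sum)).sum =
      ((pvCellsN M N).map (fun q => F q.1 q.2)).sum := by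
  rw [pvCellsN]
  induction (List.range M) with
  | nil => simp
  | cons y t ih => simp [List.flatMap_cons, ih, List.map_map, Function.comp_def]

lemma pv_sum_ite_filter {α : Type} (l : List α) (q : α → Bool) (G : α → Int) :
    (l.map (fun a => if q a then G a else 0)).sum = ((l.filter q).map G).sum := by
  induction l with
  | nil => simp
  | cons h t ih =>
    by_cases hq : q h <;> simp [hq, ih]

lemma pv_sum_one_sub (l : List Nat) (f : Nat → Int) :
    (l.map (fun x => 1 - f x)).sum = (l.length : Int) - (l.map f).sum := by
  induction l with
  | nil => simp
  | cons h t ih => simp [ih]; ring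

lemma pv_sum_bernoulli (l : List Int) (hl : ∀ v ∈ l, v = 0 ∨ v = 1) (A0 B0 : Int) :
    (l.map (fun v => if v = 1 then A0 else B0)).sum =
      A0 * l.sum + B0 * ((l.length : Int) - l.sum) := by
  induction l with
  | nil => simp
  | cons h t ih =>
    have ht : ∀ v ∈ t, v = 0 ∨ v = 1 := fun v hv => hl v (List.mem_cons_of_mem _ hv)
    rcases hl h (List.mem_cons_self) with rfl | rfl <;>
      simp [ih ht] <;> ring


lemma pv_blacks_nil (m n : Int) (grid : List (List String)) (h : m < 0 ∨ n < 0) :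
    pvBlacks m n grid = [] := by
  rw [pvBlacks, pvCells]
  rcases h with h | h
  · rw [pv_pyRange0 m, Int.toNat_of_nonpos h.le]
    simp
  · rw [pv_pyRange0 n, Int.toNat_of_nonpos h.le]
    simp

lemma pv_core (m n : Int) (grid : List (List String)) (hm : 0 ≤ m) (hn : 0 ≤ n) :
    ((List.range m.toNat).map (fun (y : Nat) =>
        ((List.range n.toNat).map (fun (x : Nat) =>
          (pvCCk (pvBlacks m n grid) x + pvRCk (pvBlacks m n grid) y +
            (if ((x : Int), (y : Int)) ∈ pvBlacks m n grid then 1 else 0)) % 2)).sum)).sum =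
      (n - ((List.range n.toNat).map (fun j => pvCCk (pvBlacks m n grid) j % 2)).sum) *
          ((List.range m.toNat).map (fun j => pvRCk (pvBlacks m n grid) j % 2)).sum +
        ((List.range n.toNat).map (fun j => pvCCk (pvBlacks m n grid) j % 2)).sum *
          (m - ((List.range m.toNat).map (fun j => pvRCk (pvBlacks m n grid) j % 2)).sum) +
        ((pvBlacks m n grid).map (fun p =>
          1 - 2 * ((pvCCk (pvBlacks m n grid) p.1.toNat % 2 +
            pvRCk (pvBlacks m n grid) p.2.toNat % 2) % 2))).sum := by
  set L := pvBlacks m n grid with hLdef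
  set M := m.toNat with hM
  set N := n.toNat with hN
  -- Step 1: split each cell's parity into the all-white part and the black correction
  have step1 : ((List.range M).map (fun (y : Nat) =>
        ((List.range N).map (fun (x : Nat) =>
          (pvCCk L x + pvRCk L y + (if ((x : Int), (y : Int)) ∈ L then 1 else 0)) % 2)).sum)).sum =
      ((List.range M).map (fun (y : Nat) =>
        ((List.range N).map (fun (x : Nat) => (pvCCk L x % 2 + pvRCk L y % 2) % 2)).sum)).sum +
      ((List.range M).map (fun (y : Nat) =>
        ((List.range N).map (fun (x : Nat) =>
          if ((x : Int), (y : Int)) ∈ L then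
            1 - 2 * ((pvCCk L x % 2 + pvRCk L y % 2) % 2) else 0)).sum)).sum := by
    rw [← PySem.List.sum_map_add_int]
    refine congrArg List.sum (List.map_congr_left fun y _ => ?_)
    rw [← PySem.List.sum_map_add_int]
    refine congrArg List.sum (List.map_congr_left fun x _ => ?_)
    by_cases hb : ((x : Int), (y : Int)) ∈ L <;> simp only [hb, if_true, if_false] <;> omega
  -- Step 2: the all-white part counted by parity classes
  have step2 : ((List.range M).map (fun (y : Nat) =>
        ((List.range N).map (fun (x : Nat) => (pvCCk L x % 2 + pvRCk L y % 2) % 2)).sum)).sum =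
      ((N : Int) - ((List.range N).map (fun j => pvCCk L j % 2)).sum) *
          ((List.range M).map (fun j => pvRCk L j % 2)).sum +
        ((List.range N).map (fun j => pvCCk L j % 2)).sum *
          ((M : Int) - ((List.range M).map (fun j => pvRCk L j % 2)).sum) := by
    have hrow : ∀ y : Nat, ((List.range N).map (fun (x : Nat) =>
        (pvCCk L x % 2 + pvRCk L y % 2) % 2)).sum =
        if pvRCk L y % 2 = 1 then ((N : Int) - ((List.range N).map (fun j => pvCCk L j % 2)).sum)
        else ((List.range N).map (fun j => pvCCk L j % 2)).sum := by
      intro y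
      by_cases hy : pvRCk L y % 2 = 1
      · rw [if_pos hy]
        have : ((List.range N).map (fun (x : Nat) => (pvCCk L x % 2 + pvRCk L y % 2) % 2)) =
            ((List.range N).map (fun (x : Nat) => 1 - pvCCk L x % 2)) := by
          refine List.map_congr_left fun x _ => ?_
          have := Int.emod_two_eq (pvCCk L x)
          omega
        rw [this]
        have := pv_sum_one_sub (List.range N) (fun x => pvCCk L x % 2)
        simpa using this
      · have hy0 : pvRCk L y % 2 = 0 := by
          have := Int.emod_two_eq (pvRCk L y); omega
        rw [if_neg hy]
        refine congrArg List.sum (List.map_congr_left fun x _ => ?_)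
        have := Int.emod_two_eq (pvCCk L x)
        omega
    calc ((List.range M).map (fun (y : Nat) =>
            ((List.range N).map (fun (x : Nat) => (pvCCk L x % 2 + pvRCk L y % 2) % 2)).sum)).sum
        = (((List.range M).map (fun j => pvRCk L j % 2)).map (fun v =>
            if v = 1 then ((N : Int) - ((List.range N).map (fun j => pvCCk L j % 2)).sum)
            else ((List.range N).map (fun j => pvCCk L j % 2)).sum)).sum := by
          rw [List.map_map]
          exact congrArg List.sum (List.map_congr_left fun y _ => hrow y)
      _ = _ := by
          rw [pv_sum_bernoulli _ (fun v hv => by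
            rw [List.mem_map] at hv
            obtain ⟨j, _, rfl⟩ := hv
            have := Int.emod_two_eq (pvRCk L j); omega)]
          simp [List.length_map, List.length_range]
  -- Step 3: the correction part is a sum over the black cells only
  have step3 : ((List.range M).map (fun (y : Nat) =>
        ((List.range N).map (fun (x : Nat) =>
          if ((x : Int), (y : Int)) ∈ L then
            1 - 2 * ((pvCCk L x % 2 + pvRCk L y % 2) % 2) else 0)).sum)).sum =
      (L.map (fun p =>
        1 - 2 * ((pvCCk L p.1.toNat % 2 + pvRCk L p.2.toNat % 2) % 2))).sum := by
    rw [pv_double_sum M N (fun x y =>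
      if ((x : Int), (y : Int)) ∈ L then 1 - 2 * ((pvCCk L x % 2 + pvRCk L y % 2) % 2) else 0)]
    have hcast : ((pvCellsN M N).map (fun q =>
        if ((q.1 : Int), (q.2 : Int)) ∈ L then
          1 - 2 * ((pvCCk L q.1 % 2 + pvRCk L q.2 % 2) % 2) else 0)).sum =
        ((pvCells m n).map (fun p =>
          if p ∈ L then
            1 - 2 * ((pvCCk L p.1.toNat % 2 + pvRCk L p.2.toNat % 2) % 2) else 0)).sum := by
      rw [pv_cells_eq, List.map_map]
      refine congrArg List.sum (List.map_congr_left fun q _ => ?_)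
      simp
    rw [hcast]
    have hmem : ((pvCells m n).map (fun p =>
        if p ∈ L then
          1 - 2 * ((pvCCk L p.1.toNat % 2 + pvRCk L p.2.toNat % 2) % 2) else 0)).sum =
        ((pvCells m n).map (fun p =>
          if (pvCell grid p.2 p.1 == "B") then
            1 - 2 * ((pvCCk L p.1.toNat % 2 + pvRCk L p.2.toNat % 2) % 2) else 0)).sum := by
      refine congrArg List.sum (List.map_congr_left fun p hp => ?_)
      by_cases hq : pvCell grid p.2 p.1 == "B"
      · have : p ∈ L := by
          rw [hLdef, pvBlacks, List.mem_filter]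
          exact ⟨hp, hq⟩
        simp [this, hq]
      · have : p ∉ L := by
          rw [hLdef, pvBlacks, List.mem_filter]
          intro hc
          exact hq hc.2
        simp [this, hq]
    rw [hmem, pv_sum_ite_filter]
    rw [hLdef, pvBlacks]
  rw [step1, step2, step3]
  rw [show ((N : Int)) = n from by omega, show ((M : Int)) = m from by omega]

lemma pv_A_eval (m n : Int) (grid : List (List String)) :
    minimum_flips_to_white m n grid =
      ((List.range m.toNat).map (fun (y : Nat) =>
        ((List.range n.toNat).map (fun (x : Nat) =>
          (pvCCk (pvBlacks m n grid) x + pvRCk (pvBlacks m n grid) y +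
            (if ((x : Int), (y : Int)) ∈ pvBlacks m n grid then 1 else 0)) % 2)).sum)).sum := by
  have h1 : ∀ (init : List Int × (List Int × PySem.Set (Int × Int))),
      (pvCells m n).foldl (fun s p =>
        if pvCell grid p.2 p.1 == "B" then
          (s.1.modify p.1.toNat (· + 1),
           (s.2.1.modify p.2.toNat (· + 1), PySem.Set.add s.2.2 p))
        else s) init =
      (PySem.List.pyRange 0 m).foldl (fun s y =>
        (PySem.List.pyRange 0 n).foldl (fun s x =>
          if pvCell grid y x == "B" then
            (s.1.modify x.toNat (· + 1),
             (s.2.1.modify y.toNat (· + 1), PySem.Set.add s.2.2 (x, y)))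
          else s) s) init := by
    intro init
    rw [pvCells, List.foldl_flatMap]
    simp only [List.foldl_map]
  unfold minimum_flips_to_white
  simp only []
  rw [PySem.List.pyRepeat_singleton, PySem.List.pyRepeat_singleton, ← h1,
    PySem.List.foldl_if_eq_foldl_filter (p := fun p : Int × Int => pvCell grid p.2 p.1 == "B"),
    ← pvBlacks]
  rw [PySem.List.foldl_prod_mk
    (f := fun (a : List Int) (p : Int × Int) => a.modify p.1.toNat (· + 1))
    (g := fun (b : List Int × PySem.Set (Int × Int)) (p : Int × Int) =>
      (b.1.modify p.2.toNat (· + 1), PySem.Set.add b.2 p))]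
  rw [PySem.List.foldl_prod_mk
    (f := fun (a : List Int) (p : Int × Int) => a.modify p.2.toNat (· + 1))
    (g := fun (s : PySem.Set (Int × Int)) (p : Int × Int) => PySem.Set.add s p)]
  dsimp only
  rw [pv_modify_fold_eq_map, pv_modify_fold_eq_map]
  have hset : List.foldl (fun (s : PySem.Set (Int × Int)) p => s.add p) PySem.Set.empty
      (pvBlacks m n grid) = PySem.Set.ofList (pvBlacks m n grid) :=
    (PySem.Set.ofList_eq_foldl _).symm
  rw [hset]
  simp only [PySem.List.foldl_add]
  rw [pv_pyRange0 m, pv_pyRange0 n]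
  simp only [List.map_map, Function.comp_def, zero_add]
  refine congrArg List.sum (List.map_congr_left fun y hy => ?_)
  refine congrArg List.sum (List.map_congr_left fun x hx => ?_)
  rw [List.mem_range] at hy hx
  rw [Int.toNat_natCast, Int.toNat_natCast,
    PySem.List.getD_map_range _ _ _ _ hx, PySem.List.getD_map_range _ _ _ _ hy,
    pv_iter_add, pv_iter_add, PySem.Int.band_one,
    PySem.Int.mod_eq_emod_of_pos (by norm_num)]
  simp [pvCCk, pvRCk, PySem.Set.mem_ofList]

-- a dict built by xor-modifies, read back at one key
lemma pv_dict_modify_fold_getD {β : Type} (key : β → Int) (f : Int → Int)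
    (l : List β) (d : PySem.Dict Int Int) (k : Int) :
    (l.foldl (fun d p => d.modify (key p) 0 f) d).getD k 0 =
      f^[l.countP (fun p => key p = k)] (d.getD k 0) := by
  induction l generalizing d with
  | nil => simp
  | cons h t ih =>
    simp only [List.foldl_cons, ih, List.countP_cons, PySem.Dict.getD_modify]
    rcases eq_or_ne (key h) k with hk | hk
    · rw [if_pos hk.symm]
      simp [hk, Function.iterate_succ_apply]
    · rw [if_neg (fun hh => hk hh.symm)]
      simp [hk]

-- a sum over distinct keys drawn from range N, padded by zeros, is the sum over range N
lemma pv_sum_over_keys (K : List Int) (N : Nat) (g : Nat → Int)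
    (hnd : K.Nodup)
    (hsub : ∀ k ∈ K, ∃ j : Nat, j < N ∧ k = (j : Int))
    (hzero : ∀ j : Nat, j < N → ((j : Int) ∉ K) → g j = 0) :
    (K.map (fun k => g k.toNat)).sum = ((List.range N).map g).sum := by
  have hperm : K.Perm (((List.range N).filter (fun (j : Nat) => decide ((j : Int) ∈ K))).map
      (fun (j : Nat) => (j : Int))) := by
    refine (List.perm_ext_iff_of_nodup hnd ?_).mpr ?_
    · exact ((List.nodup_range).filter _).map (fun a b h => by exact_mod_cast h)
    · intro z
      constructor
      · intro hz
        obtain ⟨j, hj, rfl⟩ := hsub z hz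
        exact List.mem_map.mpr ⟨j, List.mem_filter.mpr
          ⟨List.mem_range.mpr hj, by simpa using hz⟩, rfl⟩
      · intro hz
        obtain ⟨j, hjf, rfl⟩ := List.mem_map.mp hz
        simpa using (List.mem_filter.mp hjf).2
  calc (K.map (fun k => g k.toNat)).sum
      = ((((List.range N).filter (fun (j : Nat) => decide ((j : Int) ∈ K))).map
          (fun (j : Nat) => (j : Int))).map (fun k => g k.toNat)).sum :=
        (hperm.map _).sum_eq
    _ = (((List.range N).filter (fun (j : Nat) => decide ((j : Int) ∈ K))).map g).sum := by
        rw [List.map_map]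
        exact congrArg List.sum (List.map_congr_left fun j _ => by simp)
    _ = ((List.range N).map g).sum := by
        rw [← pv_sum_ite_filter]
        refine congrArg List.sum (List.map_congr_left fun j hj => ?_)
        by_cases hq : (j : Int) ∈ K
        · simp [hq]
        · simp [hq, hzero j (List.mem_range.mp hj) hq]

-- the column-parity dict of B, read at a nonnegative key
lemma pv_dict_col (m n : Int) (grid : List (List String)) (k : Int) (hk : 0 ≤ k) :
    ((pvBlacks m n grid).foldl (fun d p => d.modify p.1 0 (fun v => PySem.Int.bxor v 1))
        (PySem.Dict.empty : PySem.Dict Int Int)).getD k 0 =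
      pvCCk (pvBlacks m n grid) k.toNat % 2 := by
  rw [pv_dict_modify_fold_getD (key := fun p : Int × Int => p.1), PySem.Dict.getD_empty,
    pv_iter_bxor, pvCCk]
  congr 2
  refine List.countP_congr fun p hp => ?_
  obtain ⟨h1, h2, hp12⟩ := pv_blacks_mem m n grid p hp
  have h1' : p.1 = ((p.1.toNat : Nat) : Int) := congrArg Prod.fst hp12
  simp only [decide_eq_true_eq]
  omega

lemma pv_dict_row (m n : Int) (grid : List (List String)) (k : Int) (hk : 0 ≤ k) :
    ((pvBlacks m n grid).foldl (fun d p => d.modify p.2 0 (fun v => PySem.Int.bxor v 1))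
        (PySem.Dict.empty : PySem.Dict Int Int)).getD k 0 =
      pvRCk (pvBlacks m n grid) k.toNat % 2 := by
  rw [pv_dict_modify_fold_getD (key := fun p : Int × Int => p.2), PySem.Dict.getD_empty,
    pv_iter_bxor, pvRCk]
  congr 2
  refine List.countP_congr fun p hp => ?_
  obtain ⟨h1, h2, hp12⟩ := pv_blacks_mem m n grid p hp
  have h2' : p.2 = ((p.2.toNat : Nat) : Int) := congrArg Prod.snd hp12
  simp only [decide_eq_true_eq]
  omega

lemma pv_dict_col_sum (m n : Int) (grid : List (List String)) :
    ((pvBlacks m n grid).foldl (fun d p => d.modify p.1 0 (fun v => PySem.Int.bxor v 1))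
        (PySem.Dict.empty : PySem.Dict Int Int)).values.sum =
      ((List.range n.toNat).map (fun j => pvCCk (pvBlacks m n grid) j % 2)).sum := by
  set L := pvBlacks m n grid with hL
  set d1 := L.foldl (fun d p => d.modify p.1 0 (fun v => PySem.Int.bxor v 1))
    (PySem.Dict.empty : PySem.Dict Int Int) with hd1
  have hK : d1.keys = PySem.Set.ofList (L.map (fun p => p.1)) := by
    rw [hd1, PySem.Dict.keys_foldl_modify_key L (fun p => p.1) 0 (fun _ _ v => PySem.Int.bxor v 1),
      PySem.Dict.keys_empty, PySem.Set.update_nil_left]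
  have hnd : d1.keys.Nodup := by rw [hK]; exact PySem.Set.nodup_ofList _
  rw [PySem.Dict.values_eq_map_keys d1 hnd 0, hK]
  have hstep : (PySem.Set.ofList (L.map (fun p => p.1))).map (fun k => d1.getD k 0) =
      (PySem.Set.ofList (L.map (fun p => p.1))).map
        (fun k => pvCCk L k.toNat % 2) := by
    refine List.map_congr_left fun k hk => ?_
    have hk' := (PySem.Set.mem_ofList _ _).mp hk
    obtain ⟨q, hq, rfl⟩ := List.mem_map.mp hk'
    obtain ⟨_, _, hq12⟩ := pv_blacks_mem m n grid q hq
    have : 0 ≤ q.1 := by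
      have := congrArg Prod.fst hq12; simp only at this; omega
    exact pv_dict_col m n grid q.1 this
  rw [hstep]
  refine pv_sum_over_keys _ _ (fun j => pvCCk L j % 2) (PySem.Set.nodup_ofList _) ?_ ?_
  · intro k hk
    obtain ⟨q, hq, rfl⟩ := List.mem_map.mp ((PySem.Set.mem_ofList _ _).mp hk)
    obtain ⟨h1, _, hq12⟩ := pv_blacks_mem m n grid q hq
    exact ⟨q.1.toNat, h1, congrArg Prod.fst hq12⟩
  · intro j hj hjK
    have hc : L.countP (fun p => p.1.toNat = j) = 0 := by
      refine List.countP_eq_zero.mpr fun p hp hpj => ?_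
      obtain ⟨_, _, hp12⟩ := pv_blacks_mem m n grid p hp
      have h1' : p.1 = ((p.1.toNat : Nat) : Int) := congrArg Prod.fst hp12
      refine hjK ((PySem.Set.mem_ofList _ _).mpr (List.mem_map.mpr ⟨p, hp, ?_⟩))
      simp only [decide_eq_true_eq] at hpj
      omega
    simp [pvCCk, hc]

lemma pv_dict_row_sum (m n : Int) (grid : List (List String)) :
    ((pvBlacks m n grid).foldl (fun d p => d.modify p.2 0 (fun v => PySem.Int.bxor v 1))
        (PySem.Dict.empty : PySem.Dict Int Int)).values.sum =
      ((List.range m.toNat).map (fun j => pvRCk (pvBlacks m n grid) j % 2)).sum := by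
  set L := pvBlacks m n grid with hL
  set d1 := L.foldl (fun d p => d.modify p.2 0 (fun v => PySem.Int.bxor v 1))
    (PySem.Dict.empty : PySem.Dict Int Int) with hd1
  have hK : d1.keys = PySem.Set.ofList (L.map (fun p => p.2)) := by
    rw [hd1, PySem.Dict.keys_foldl_modify_key L (fun p => p.2) 0 (fun _ _ v => PySem.Int.bxor v 1),
      PySem.Dict.keys_empty, PySem.Set.update_nil_left]
  have hnd : d1.keys.Nodup := by rw [hK]; exact PySem.Set.nodup_ofList _
  rw [PySem.Dict.values_eq_map_keys d1 hnd 0, hK]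
  have hstep : (PySem.Set.ofList (L.map (fun p => p.2))).map (fun k => d1.getD k 0) =
      (PySem.Set.ofList (L.map (fun p => p.2))).map
        (fun k => pvRCk L k.toNat % 2) := by
    refine List.map_congr_left fun k hk => ?_
    have hk' := (PySem.Set.mem_ofList _ _).mp hk
    obtain ⟨q, hq, rfl⟩ := List.mem_map.mp hk'
    obtain ⟨_, _, hq12⟩ := pv_blacks_mem m n grid q hq
    have : 0 ≤ q.2 := by
      have := congrArg Prod.snd hq12; simp only at this; omega
    exact pv_dict_row m n grid q.2 this
  rw [hstep]
  refine pv_sum_over_keys _ _ (fun j => pvRCk L j % 2) (PySem.Set.nodup_ofList _) ?_ ?_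
  · intro k hk
    obtain ⟨q, hq, rfl⟩ := List.mem_map.mp ((PySem.Set.mem_ofList _ _).mp hk)
    obtain ⟨_, h2, hq12⟩ := pv_blacks_mem m n grid q hq
    exact ⟨q.2.toNat, h2, congrArg Prod.snd hq12⟩
  · intro j hj hjK
    have hc : L.countP (fun p => p.2.toNat = j) = 0 := by
      refine List.countP_eq_zero.mpr fun p hp hpj => ?_
      obtain ⟨_, _, hp12⟩ := pv_blacks_mem m n grid p hp
      have h2' : p.2 = ((p.2.toNat : Nat) : Int) := congrArg Prod.snd hp12
      refine hjK ((PySem.Set.mem_ofList _ _).mpr (List.mem_map.mpr ⟨p, hp, ?_⟩))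
      simp only [decide_eq_true_eq] at hpj
      omega
    simp [pvRCk, hc]

lemma pv_B_eval (m n : Int) (grid : List (List String)) :
    minimum_flips_to_white_alt m n grid =
      (n - ((List.range n.toNat).map (fun j => pvCCk (pvBlacks m n grid) j % 2)).sum) *
          ((List.range m.toNat).map (fun j => pvRCk (pvBlacks m n grid) j % 2)).sum +
        ((List.range n.toNat).map (fun j => pvCCk (pvBlacks m n grid) j % 2)).sum *
          (m - ((List.range m.toNat).map (fun j => pvRCk (pvBlacks m n grid) j % 2)).sum) +
        ((pvBlacks m n grid).map (fun p =>
          1 - 2 * ((pvCCk (pvBlacks m n grid) p.1.toNat % 2 +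
            pvRCk (pvBlacks m n grid) p.2.toNat % 2) % 2))).sum := by
  unfold minimum_flips_to_white_alt
  simp only []
  rw [pv_blacks_eq]
  rw [PySem.List.foldl_prod_mk
    (f := fun (d : PySem.Dict Int Int) (p : Int × Int) => d.modify p.1 0 (fun v => PySem.Int.bxor v 1))
    (g := fun (d : PySem.Dict Int Int) (p : Int × Int) => d.modify p.2 0 (fun v => PySem.Int.bxor v 1))]
  dsimp only
  rw [pv_dict_col_sum, pv_dict_row_sum]
  rw [List.map_congr_left (l := pvBlacks m n grid)
    (g := fun p =>
      1 - 2 * ((pvCCk (pvBlacks m n grid) p.1.toNat % 2 +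
        pvRCk (pvBlacks m n grid) p.2.toNat % 2) % 2))
    (fun p hp => by
      obtain ⟨h1, h2, hp12⟩ := pv_blacks_mem m n grid p hp
      have hx : 0 ≤ p.1 := by
        have := congrArg Prod.fst hp12; simp only at this; omega
      have hy : 0 ≤ p.2 := by
        have := congrArg Prod.snd hp12; simp only at this; omega
      rw [pv_dict_col m n grid p.1 hx, pv_dict_row m n grid p.2 hy,
        PySem.Int.band_one, PySem.Int.mod_eq_emod_of_pos (by norm_num)])]

-- ===== VERDICT (by name: the statement is the Claim_ definition above) =====
theorem minimum_flips_to_white_spec : Claim_equal_minimum_flips_to_white := by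
  intro m n grid _ _
  unfold Spec_minimum_flips_to_white
  rw [pv_A_eval, pv_B_eval]
  by_cases hm : 0 ≤ m
  · by_cases hn : 0 ≤ n
    · exact pv_core m n grid hm hn
    · rw [pv_blacks_nil m n grid (Or.inr (by omega))]
      simp [pvCCk, pvRCk]
  · rw [pv_blacks_nil m n grid (Or.inl (by omega))]
    simp [pvCCk, pvRCk]
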